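-- pv_equiv track=rewrite | github.com/jon-tj/Koji-Stocks | backtesting_engine/indicator.py | AROON
-- ===== SOURCE A (Python) =====
-- def AROON(data,Period=14):
--     #Aroon-Up = [(number of periods) - (number of periods since the High)] / (number of periods) * 100%.
--     #Aroon-Down = [(number of periods) - (number of periods since the Low)] / (number of periods) * 100%.
--
--     try:
--         high    = data["Quotes"]["High"]
--         low     = data["Quotes"]["Low"]
--     except:
--         high = low = data
--
--     Arroon = [50]*Period
--     High_list = high #[i for i in high[0:len(data['close'])]]
--     Low_list  = low  #[i for i in low[0:len(data['close'])]]
--     for i in range(Period,len(high)):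
--         start = i-Period
--         last_h = Period-High_list[start:i].index(max(High_list[start:i]))
--         last_l = Period- Low_list[start:i].index(min( Low_list[start:i]))
--         Arroon.append(last_l-last_h+50)
--     return Arroon
-- ===== SOURCE B (Python) =====
-- from collections import deque
--
--
-- def AROON(data, Period=14):
--     # Sliding-window first-occurrence argmax/argmin via monotonic deques: O(n)
--     # instead of rescanning the whole Period-window at every position.
--     try:
--         high = data["Quotes"]["High"]
--         low = data["Quotes"]["Low"]
--     except Exception:
--         high = low = data
--
--     out = [50] * Period
--     maxq = deque()  # indices, values non-increasing; front = first max of window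
--     minq = deque()  # indices, values non-decreasing; front = first min of window
--     for j in range(len(high) - 1):
--         while maxq and high[maxq[-1]] < high[j]:
--             maxq.pop()
--         maxq.append(j)
--         while minq and low[minq[-1]] > low[j]:
--             minq.pop()
--         minq.append(j)
--         i = j + 1
--         if i >= Period:
--             lo = i - Period  # window is indices lo..j
--             while maxq[0] < lo:
--                 maxq.popleft()
--             while minq[0] < lo:
--                 minq.popleft()
--             out.append(maxq[0] - minq[0] + 50)
--     return out
-- ===== Notes on version B (the rewrite author's own statement) =====
-- stated objective: faster
-- what changed: Replaces the per-position full rescan of each Period-window (slice + max/min + list.index) by a single pass with two monotonic deques whose fronts hold the first-occurrence argmax/argmin of the sliding window.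
import Mathlib
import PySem

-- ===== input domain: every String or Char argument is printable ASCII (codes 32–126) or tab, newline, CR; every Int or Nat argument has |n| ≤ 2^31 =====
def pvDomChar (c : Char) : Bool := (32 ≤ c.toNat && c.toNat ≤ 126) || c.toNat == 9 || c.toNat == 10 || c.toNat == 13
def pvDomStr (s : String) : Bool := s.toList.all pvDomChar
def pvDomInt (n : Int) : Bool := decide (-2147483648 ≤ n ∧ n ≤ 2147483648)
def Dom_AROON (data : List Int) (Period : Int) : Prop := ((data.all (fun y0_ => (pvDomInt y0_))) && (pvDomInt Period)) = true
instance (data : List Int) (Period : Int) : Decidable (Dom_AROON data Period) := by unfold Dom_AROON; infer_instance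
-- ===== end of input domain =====

-- B replaces A's per-position window rescan (slice + max/min + .index)
-- by one pass with two monotonic deques (objective: faster; measured).


-- ===== PORT A =====
-- data["Quotes"] raises TypeError on a list input, so the except-branch takes high = low = data.
-- max()/min() of an empty window slice raise ValueError; Pre_AROON excludes those inputs,
-- so the ports use .getD defaults there.
def AROON (data : List Int) (Period : Int) : List Int :=
  let high := data
  let low := data
  let Arroon := List.replicate Period.toNat 50
  (PySem.List.pyRange Period (PySem.List.len high) 1).foldl
    (fun acc i =>
      let start := i - Period
      let winH := PySem.List.slice high (some start) (some i)
      let winL := PySem.List.slice low (some start) (some i)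
      let maxH := (PySem.List.max? winH (fun x => x)).getD 0
      let minL := (PySem.List.min? winL (fun x => x)).getD 0
      let last_h := Period - (((PySem.List.index? winH maxH).getD 0 : Nat) : Int)
      let last_l := Period - (((PySem.List.index? winL minL).getD 0 : Nat) : Int)
      acc ++ [last_l - last_h + 50])
    Arroon

-- ===== PORT B =====
-- Transliteration of Source B: deques are lists of indices (front = head); 'pop from back while p'
-- is reverse/dropWhile/reverse, 'popleft while p' is dropWhile; maxq[0] raises on an empty
-- deque (only reachable for Period ≤ 0, outside Pre_AROON), so headD is used there.
def AROON_alt (data : List Int) (Period : Int) : List Int :=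
  let high := data
  let low := data
  let out := List.replicate Period.toNat 50
  let final := (List.range (high.length - 1)).foldl
    (fun (st : List Nat × List Nat × List Int) j =>
      let maxq := (st.1.reverse.dropWhile (fun m => decide (high.getD m 0 < high.getD j 0))).reverse ++ [j]
      let minq := (st.2.1.reverse.dropWhile (fun m => decide (low.getD m 0 > low.getD j 0))).reverse ++ [j]
      let i : Int := (j : Int) + 1
      if Period ≤ i then
        let lo := i - Period
        let maxq := maxq.dropWhile (fun m : Nat => decide ((m : Int) < lo))
        let minq := minq.dropWhile (fun m : Nat => decide ((m : Int) < lo))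
        (maxq, minq, st.2.2 ++ [((maxq.headD 0 : Nat) : Int) - ((minq.headD 0 : Nat) : Int) + 50])
      else
        (maxq, minq, st.2.2))
    ([], [], out)
  final.2.2

-- ===== PRECONDITION & SPEC =====
-- Pre_ excludes Period ≤ 0 (except the trivial Period = 0 with empty data, where A returns []):
-- on every such input A raises ValueError (max() of an empty window slice).
def Pre_AROON (data : List Int) (Period : Int) : Prop := 1 ≤ Period ∨ (Period = 0 ∧ data = [])
instance (data : List Int) (Period : Int) : Decidable (Pre_AROON data Period) := by unfold Pre_AROON; infer_instance
def pvWitness_AROON : List Int × Int := ([3, 1, 4, 1, 5, 9, 2, 6], 3)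

def Spec_AROON (data : List Int) (Period : Int) (out : List Int) : Prop := out = AROON_alt data Period
instance (data : List Int) (Period : Int) (out : List Int) : Decidable (Spec_AROON data Period out) := by unfold Spec_AROON; infer_instance

-- ===== CLAIM (what is proved, stated in full; the proofs are below) =====
def Claim_equal_AROON : Prop := ∀ (data : List Int) (Period : Int), Dom_AROON data Period → Pre_AROON data Period → Spec_AROON data Period (AROON data Period)

-- ===== LEMMAS AND PROOFS =====

-- value of index m (indices used by the loops are always in range, so the default is never read)
def gv (data : List Int) (m : Nat) : Int := data.getD m 0

-- The monotonic deque after pushing indices 0..j and evicting indices < lo: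
-- exactly the indices m in [lo, j] whose value (weakly) dominates every later value in the window.
def dq (v : Nat → Int) (lo j : Nat) : List Nat :=
  (List.range (j + 1)).filter (fun m => decide (lo ≤ m ∧ ∀ k < j + 1, m < k → v k ≤ v m))

theorem mem_dq {v : Nat → Int} {lo j m : Nat} :
    m ∈ dq v lo j ↔ m ≤ j ∧ lo ≤ m ∧ ∀ k, m < k → k ≤ j → v k ≤ v m := by
  simp only [dq, List.mem_filter, List.mem_range, decide_eq_true_eq, Nat.lt_succ_iff]
  constructor
  · rintro ⟨h1, h2, h3⟩
    exact ⟨h1, h2, fun k hk hk' => h3 k (by omega) hk⟩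
  · rintro ⟨h1, h2, h3⟩
    exact ⟨h1, h2, fun k hk hk' => h3 k hk' (by omega)⟩

theorem dq_sorted (v : Nat → Int) (lo j : Nat) : (dq v lo j).Pairwise (· < ·) := by
  exact List.Pairwise.sublist (List.filter_sublist) List.pairwise_lt_range

-- 'pop from the back while p' on a list where p propagates forward is a filter
theorem popBack_eq_filter {α : Type} (p : α → Bool) :
    ∀ l : List α, l.Pairwise (fun a b => p a = true → p b = true) →
      (l.reverse.dropWhile p).reverse = l.filter (fun x => !p x) := by
  intro l
  induction l with
  | nil => simp
  | cons x t ih =>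
    intro hp
    rw [List.pairwise_cons] at hp
    by_cases hx : p x = true
    · have hall : ∀ a ∈ (x :: t).reverse, p a = true := by
        intro a ha
        rw [List.mem_reverse] at ha
        rcases List.mem_cons.mp ha with h | h
        · rw [h]; exact hx
        · exact hp.1 a h hx
      rw [List.dropWhile_eq_nil_iff.mpr hall]
      have : List.filter (fun x => !p x) (x :: t) = [] := by
        rw [List.filter_eq_nil_iff]
        intro a ha
        simp [hall a (by rw [List.mem_reverse]; exact ha)]
      rw [this]; rfl
    · have hrev : (x :: t).reverse = t.reverse ++ [x] := by simp
      rw [hrev, List.dropWhile_append]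
      by_cases he : (List.dropWhile p t.reverse).isEmpty
      · rw [if_pos he, List.dropWhile_cons_of_neg (by simp [hx])]
        have := ih hp.2
        rw [List.isEmpty_iff.mp he] at this
        simp only [List.reverse_nil] at this
        simp only [List.filter_cons]
        rw [Bool.not_eq_true] at hx
        simp [hx, ← this]
      · rw [if_neg he, List.reverse_append, List.reverse_cons, List.reverse_nil,
          List.nil_append, ih hp.2, List.filter_cons]
        simp [hx]

-- 'pop from the front while p' on a list where ¬p propagates forward is a filter
theorem popFront_eq_filter {α : Type} (p : α → Bool) :
    ∀ l : List α, l.Pairwise (fun a b => p b = true → p a = true) →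
      l.dropWhile p = l.filter (fun x => !p x) := by
  intro l
  induction l with
  | nil => simp
  | cons x t ih =>
    intro hp
    rw [List.pairwise_cons] at hp
    by_cases hx : p x = true
    · rw [List.dropWhile_cons_of_pos hx, List.filter_cons, hx, ih hp.2]
      rfl
    · rw [List.dropWhile_cons_of_neg (by simp [hx]), List.filter_cons]
      have : List.filter (fun x => !p x) t = t := by
        rw [List.filter_eq_self]
        intro a ha
        simp only [Bool.not_eq_eq_eq_not, Bool.not_true]
        by_cases hpa : p a = true
        · exact absurd (hp.1 a ha hpa) hx
        · simpa using hpa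
      simp [hx, this]

theorem dq_push (v : Nat → Int) (lo j : Nat) (h : lo ≤ j + 1) :
    ((dq v lo j).reverse.dropWhile (fun m => decide (v m < v (j + 1)))).reverse ++ [j + 1]
      = dq v lo (j + 1) := by
  have hpw : (dq v lo j).Pairwise
      (fun a b => decide (v a < v (j + 1)) = true → decide (v b < v (j + 1)) = true) := by
    refine List.Pairwise.imp_of_mem ?_ (dq_sorted v lo j)
    intro a b ha hb hab
    simp only [decide_eq_true_eq]
    have hda := (mem_dq.mp ha).2.2
    have hbj := (mem_dq.mp hb).1
    have := hda b hab hbj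
    omega
  rw [popBack_eq_filter _ _ hpw]
  unfold dq
  rw [List.range_succ (n := j + 1), List.filter_append]
  congr 1
  · rw [List.filter_filter]
    apply List.filter_congr
    intro m hm
    rw [List.mem_range] at hm
    rw [Bool.eq_iff_iff]
    simp only [Bool.and_eq_true, decide_eq_true_eq, Bool.not_eq_true',
      decide_eq_false_iff_not]
    constructor
    · rintro ⟨h3, h1, h2⟩
      refine ⟨h1, fun k hk hk' => ?_⟩
      by_cases hkj : k = j + 1
      · subst hkj; omega
      · exact h2 k (by omega) hk'
    · rintro ⟨h1, h2⟩
      refine ⟨?_, h1, fun k hk hk' => h2 k (by omega) hk'⟩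
      have := h2 (j + 1) (by omega) (by omega)
      omega
  · simp only [List.filter_cons, List.filter_nil]
    rw [if_pos]
    simp only [decide_eq_true_eq]
    exact ⟨h, fun k hk hk' => by omega⟩

theorem dq_zero (v : Nat → Int) : dq v 0 0 = [0] := by
  simp [dq, List.range_succ]

theorem dq_evict (v : Nat → Int) {lo lo' : Nat} (j : Nat) (h : lo ≤ lo') :
    (dq v lo j).dropWhile (fun m => decide (m < lo')) = dq v lo' j := by
  have hpw : (dq v lo j).Pairwise
      (fun a b => decide (b < lo') = true → decide (a < lo') = true) := by
    refine List.Pairwise.imp_of_mem ?_ (dq_sorted v lo j)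
    intro a b ha hb hab
    simp only [decide_eq_true_eq]
    omega
  rw [popFront_eq_filter _ _ hpw]
  unfold dq
  rw [List.filter_filter]
  apply List.filter_congr
  intro m hm
  rw [Bool.eq_iff_iff]
  simp only [Bool.and_eq_true, decide_eq_true_eq, Bool.not_eq_true',
    decide_eq_false_iff_not]
  constructor
  · rintro ⟨h3, h1, h2⟩
    exact ⟨by omega, h2⟩
  · rintro ⟨h1, h2⟩
    exact ⟨by omega, by omega, h2⟩

theorem headD_dq {v : Nat → Int} {lo j a : Nat} (ha : a ∈ dq v lo j)
    (hle : ∀ b ∈ dq v lo j, a ≤ b) : (dq v lo j).headD 0 = a := by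
  have hs := dq_sorted v lo j
  rcases hd : dq v lo j with _ | ⟨h, t⟩
  · rw [hd] at ha; simp at ha
  · rw [hd] at ha hle hs
    rw [List.pairwise_cons] at hs
    rcases List.mem_cons.mp ha with h1 | h1
    · simp [h1]
    · have := hs.1 a h1
      have := hle h (List.mem_cons_self)
      omega

-- the window as a map over its index range
theorem window_eq (data : List Int) (lo len : Nat) (h : lo + len ≤ data.length) :
    (data.drop lo).take len = (List.range' lo len).map (gv data) := by
  apply List.ext_getElem
  · simp; omega
  · intro i h1 h2
    simp only [List.getElem_take, List.getElem_drop, List.getElem_map, List.getElem_range']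
    have hlen : (data.drop lo).length = data.length - lo := by simp
    rw [gv, List.getD_eq_getElem data 0 (by simp at h1; omega)]
    congr 1
    omega

-- head of the max-deque = lo + first index of the maximum in the window (A's computation)
theorem head_dq_max (v : Nat → Int) (lo j : Nat) (h : lo ≤ j) :
    (dq v lo j).headD 0
      = lo + ((PySem.List.index? ((List.range' lo (j + 1 - lo)).map v)
          ((PySem.List.max? ((List.range' lo (j + 1 - lo)).map v) (fun x => x)).getD 0)).getD 0) := by
  set len := j + 1 - lo with hlendef
  set W := (List.range' lo len).map v with hWdef
  have hWlen : W.length = len := by simp [hWdef]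
  have hWne : W ≠ [] := by
    intro h'
    have := congrArg List.length h'
    rw [hWlen] at this
    simp at this
    omega
  have hWget : ∀ q (hq : q < W.length), W[q] = v (lo + q) := by
    intro q hq
    simp only [hWdef, List.getElem_map, List.getElem_range']
    congr 1
    omega
  have hWmem : ∀ k, lo ≤ k → k ≤ j → v k ∈ W := by
    intro k h1 h2
    rw [hWdef]
    exact List.mem_map.mpr ⟨k, List.mem_range'_1.mpr ⟨h1, by omega⟩, rfl⟩
  obtain ⟨M, hM⟩ : ∃ M, PySem.List.max? W (fun x => x) = some M := by
    cases hmx : PySem.List.max? W (fun x => x) with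
    | none => exact absurd ((PySem.List.max?_eq_none_iff W _).mp hmx) hWne
    | some m => exact ⟨m, rfl⟩
  have hMmax := PySem.List.max?_isMax hM
  obtain ⟨r, hr⟩ := Option.isSome_iff_exists.mp
    ((PySem.List.index?_isSome_iff W M).mpr (PySem.List.max?_mem hM))
  obtain ⟨hrlen, hWr, hfirst⟩ := PySem.List.getElem_of_index?_eq_some hr
  rw [hWlen] at hrlen
  have hrlen' : r < W.length := by omega
  have hMval : M = v (lo + r) := by rw [← hWr]; exact hWget r (by omega)
  have ha_mem : lo + r ∈ dq v lo j := by
    refine mem_dq.mpr ⟨by omega, by omega, fun k hk hk' => ?_⟩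
    have := hMmax (v k) (hWmem k (by omega) hk')
    omega
  have hmin : ∀ b ∈ dq v lo j, lo + r ≤ b := by
    intro b hb
    by_contra hlt
    rw [Nat.not_le] at hlt
    obtain ⟨hbj, hlob, hdomb⟩ := mem_dq.mp hb
    have hq : b - lo < r := by omega
    have hWq : W[b - lo]'(by omega) ≠ M := hfirst (b - lo) hq
    have hWqv : W[b - lo]'(by omega) = v b := by
      rw [hWget (b - lo) (by omega)]
      congr 1
      omega
    have h1 : v b ≤ M := hMmax (v b) (hWmem b hlob hbj)
    have h2 : v (lo + r) ≤ v b := hdomb (lo + r) (by omega) (by omega)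
    rw [hWqv] at hWq
    omega
  rw [headD_dq ha_mem hmin, hM]
  simp only [Option.getD_some]
  rw [hr]
  rfl

-- list.index of a negated value in a negated list
theorem index?_map_neg (l : List Int) (c : Int) :
    PySem.List.index? (l.map (fun x => -x)) (-c) = PySem.List.index? l c := by
  induction l with
  | nil => rfl
  | cons x t ih =>
    by_cases hx : x = c
    · subst hx
      rw [List.map_cons, PySem.List.index?_cons_self, PySem.List.index?_cons_self]
    · rw [List.map_cons, PySem.List.index?_cons_of_ne _ (fun hc => hx (by omega)),
        PySem.List.index?_cons_of_ne _ hx, ih]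

-- min side, by instantiating the max lemma at the negated values
theorem head_dq_min (v : Nat → Int) (lo j : Nat) (h : lo ≤ j) :
    (dq (fun m => -(v m)) lo j).headD 0
      = lo + ((PySem.List.index? ((List.range' lo (j + 1 - lo)).map v)
          ((PySem.List.min? ((List.range' lo (j + 1 - lo)).map v) (fun x => x)).getD 0)).getD 0) := by
  have hmax := head_dq_max (fun m => -(v m)) lo j h
  set len := j + 1 - lo with hlendef
  set W := (List.range' lo len).map v with hWdef
  have hWneg : (List.range' lo len).map (fun m => -(v m)) = W.map (fun x => -x) := by
    rw [hWdef, List.map_map]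
    rfl
  rw [hWneg] at hmax
  have hWne : W ≠ [] := by
    intro h'
    have := congrArg List.length h'
    simp [hWdef] at this
    omega
  obtain ⟨μ, hμ⟩ : ∃ μ, PySem.List.min? W (fun x => x) = some μ := by
    cases hmn : PySem.List.min? W (fun x => x) with
    | none => exact absurd ((PySem.List.min?_eq_none_iff W _).mp hmn) hWne
    | some m => exact ⟨m, rfl⟩
  obtain ⟨M', hM'⟩ : ∃ M', PySem.List.max? (W.map (fun x => -x)) (fun x => x) = some M' := by
    cases hmx : PySem.List.max? (W.map (fun x => -x)) (fun x => x) with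
    | none =>
      have := (PySem.List.max?_eq_none_iff _ _).mp hmx
      rw [List.map_eq_nil_iff] at this
      exact absurd this hWne
    | some m => exact ⟨m, rfl⟩
  have hM'val : M' = -μ := by
    obtain ⟨w, hw, hwM⟩ := List.mem_map.mp (PySem.List.max?_mem hM')
    have h1 := PySem.List.max?_isMax hM' (-μ)
      (List.mem_map.mpr ⟨μ, PySem.List.min?_mem hμ, rfl⟩)
    have h2 := PySem.List.min?_isMin hμ w hw
    omega
  rw [hM'] at hmax
  simp only [Option.getD_some] at hmax
  rw [hM'val, index?_map_neg W μ] at hmax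
  rw [hmax, hμ]
  rfl

-- the loop body of AROON_alt, named so the invariant below can speak about it
def bstep (data : List Int) (Period : Int) (st : List Nat × List Nat × List Int) (j : Nat) :
    List Nat × List Nat × List Int :=
  let maxq := (st.1.reverse.dropWhile (fun m => decide (data.getD m 0 < data.getD j 0))).reverse ++ [j]
  let minq := (st.2.1.reverse.dropWhile (fun m => decide (data.getD m 0 > data.getD j 0))).reverse ++ [j]
  let i : Int := (j : Int) + 1
  if Period ≤ i then
    let lo := i - Period
    let maxq := maxq.dropWhile (fun m : Nat => decide ((m : Int) < lo))
    let minq := minq.dropWhile (fun m : Nat => decide ((m : Int) < lo))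
    (maxq, minq, st.2.2 ++ [((maxq.headD 0 : Nat) : Int) - ((minq.headD 0 : Nat) : Int) + 50])
  else
    (maxq, minq, st.2.2)

theorem alt_eq (data : List Int) (Period : Int) :
    AROON_alt data Period
      = ((List.range (data.length - 1)).foldl (bstep data Period)
          ([], [], List.replicate Period.toNat 50)).2.2 := rfl

-- the value appended by AROON_alt at output position i (window i-Period .. i-1)
def bval (data : List Int) (Pn : Nat) (i : Nat) : Int :=
  (((dq (fun m => data.getD m 0) (i - Pn) (i - 1)).headD 0 : Nat) : Int)
    - (((dq (fun m => -(data.getD m 0)) (i - Pn) (i - 1)).headD 0 : Nat) : Int) + 50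

-- loop invariant of AROON_alt: after t ≥ 1 steps the deques are the dq of the current window
-- and the output carries one bval per completed window
theorem bloop (data : List Int) (Period : Int) (out0 : List Int) (hP : 1 ≤ Period) :
    ∀ t, 1 ≤ t →
      (List.range t).foldl (bstep data Period) ([], [], out0)
        = (dq (fun m => data.getD m 0) (t - Period.toNat) (t - 1),
           dq (fun m => -(data.getD m 0)) (t - Period.toNat) (t - 1),
           out0 ++ (List.range' Period.toNat (t + 1 - Period.toNat)).map (bval data Period.toNat)) := by
  have hPn1 : 1 ≤ Period.toNat := by omega
  have hPnint : (Period.toNat : Int) = Period := Int.toNat_of_nonneg (by omega)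
  set Pn := Period.toNat with hPndef
  set v : Nat → Int := fun m => data.getD m 0 with hvdef
  set v' : Nat → Int := fun m => -(data.getD m 0) with hv'def
  intro t ht
  induction t, ht using Nat.le_induction with
  | base =>
    rw [List.range_one, List.foldl_cons, List.foldl_nil]
    unfold bstep
    simp only []
    have hpushmax : (([] : List Nat).reverse.dropWhile
        (fun m => decide (data.getD m 0 < data.getD 0 0))).reverse ++ [0] = dq v 0 0 := by
      rw [dq_zero]
      rfl
    have hpushmin : (([] : List Nat).reverse.dropWhile
        (fun m => decide (data.getD m 0 > data.getD 0 0))).reverse ++ [0] = dq v' 0 0 := by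
      rw [dq_zero]
      rfl
    rw [hpushmax, hpushmin]
    by_cases hc : Period ≤ ((0 : Nat) : Int) + 1
    · rw [if_pos hc]
      have hp1 : Pn = 1 := by omega
      have hev : (fun m : Nat => decide ((m : Int) < ((0 : Nat) : Int) + 1 - Period))
          = (fun m : Nat => decide (m < 1 - Pn)) := by
        funext m
        apply decide_eq_decide.mpr
        omega
      rw [hev, dq_evict v 0 (by omega), dq_evict v' 0 (by omega)]
      rw [hp1]
      norm_num [bval, List.range'_one]
    · rw [if_neg hc]
      have h1 : 1 - Pn = 0 := by omega
      have h2 : 1 + 1 - Pn = 0 := by omega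
      rw [h1, h2, List.range'_zero, List.map_nil, List.append_nil]
  | succ t ht ih =>
    rw [List.range_succ, List.foldl_append, ih, List.foldl_cons, List.foldl_nil]
    unfold bstep
    simp only []
    have ht1 : t - 1 + 1 = t := by omega
    have hpushmax : ((dq v (t - Pn) (t - 1)).reverse.dropWhile
        (fun m => decide (data.getD m 0 < data.getD t 0))).reverse ++ [t]
          = dq v (t - Pn) t := by
      have h := dq_push v (t - Pn) (t - 1) (by omega)
      rw [ht1] at h
      exact h
    have hpushmin : ((dq v' (t - Pn) (t - 1)).reverse.dropWhile
        (fun m => decide (data.getD m 0 > data.getD t 0))).reverse ++ [t]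
          = dq v' (t - Pn) t := by
      have h := dq_push v' (t - Pn) (t - 1) (by omega)
      rw [ht1] at h
      rw [← h]
      congr 1
      congr 1
      congr 1
      funext m
      apply decide_eq_decide.mpr
      constructor <;> intro <;> simp only [hv'def] at * <;> omega
    rw [hpushmax, hpushmin]
    by_cases hc : Period ≤ ((t : Nat) : Int) + 1
    · rw [if_pos hc]
      have hev : (fun m : Nat => decide ((m : Int) < ((t : Nat) : Int) + 1 - Period))
          = (fun m : Nat => decide (m < t + 1 - Pn)) := by
        funext m
        apply decide_eq_decide.mpr
        omega
      rw [hev, dq_evict v t (by omega), dq_evict v' t (by omega)]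
      have hcnt : t + 1 + 1 - Pn = (t + 1 - Pn) + 1 := by omega
      rw [hcnt, List.range'_1_concat, List.map_append, List.map_singleton, Nat.add_sub_cancel,
        ← List.append_assoc]
      have hi : Pn + (t + 1 - Pn) = t + 1 := by omega
      rw [hi]
      have hbval : bval data Pn (t + 1)
          = ((dq v (t + 1 - Pn) t).headD 0 : Int) - ((dq v' (t + 1 - Pn) t).headD 0 : Int) + 50 := by
        unfold bval
        rw [Nat.add_sub_cancel]
      rw [hbval]
    · rw [if_neg hc]
      have h1 : t + 1 - 1 = t := by omega
      have h2 : t + 1 - Pn = t - Pn := by omega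
      have h3 : t + 1 + 1 - Pn = t + 1 - Pn := by omega
      rw [h1, h3, h2]

-- ===== VERDICT (by name: the statement is the Claim_ definition above) =====
theorem AROON_spec : Claim_equal_AROON := by
  unfold Claim_equal_AROON
  intro data Period hDom hPre
  unfold Spec_AROON
  rcases hPre with hP | ⟨h0, hnil⟩
  · have hPn1 : 1 ≤ Period.toNat := by omega
    have hPnint : (Period.toNat : Int) = Period := Int.toNat_of_nonneg (by omega)
    set Pn := Period.toNat with hPndef
    simp only [AROON, PySem.List.len_eq]
    rw [PySem.List.foldl_append_singleton_eq_map]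
    rw [alt_eq]
    by_cases hn : data.length ≤ 1
    · rw [show data.length - 1 = 0 from by omega, List.range_zero, List.foldl_nil]
      rw [PySem.List.pyRange_one_eq_nil (by exact_mod_cast by omega : (data.length : Int) ≤ Period)]
      rw [List.map_nil, List.append_nil]
    · rw [bloop data Period _ hP (data.length - 1) (by omega)]
      congr 1
      rw [PySem.List.pyRange_one, List.map_map, List.range'_eq_map_range, List.map_map]
      have hcnt : data.length - 1 + 1 - Pn = ((data.length : Int) - Period).toNat := by omega
      rw [hcnt]
      apply List.map_congr_left
      intro k hk
      rw [List.mem_range] at hk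
      simp only [Function.comp]
      have hb : k + Pn ≤ data.length := by omega
      rw [show Period + (k : Int) - Period = ((k : Nat) : Int) from by omega,
          show Period + (k : Int) = ((Pn + k : Nat) : Int) from by omega,
          PySem.List.slice_natCast, Nat.add_sub_cancel, window_eq data k Pn hb,
          show gv data = fun m => data.getD m 0 from rfl]
      have hhmax := head_dq_max (fun m => data.getD m 0) k (Pn + k - 1) (by omega)
      have hhmin := head_dq_min (fun m => data.getD m 0) k (Pn + k - 1) (by omega)
      rw [show Pn + k - 1 + 1 - k = Pn from by omega] at hhmax hhmin
      unfold bval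
      rw [show Pn + k - Pn = k from by omega, hhmax, hhmin]
      push_cast
      ring
  · subst h0
    subst hnil
    decide
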